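-- pv_equiv track=rewrite | github.com/SymmetricChaos/ClassicCrypto | VigenereCipher.py | affineVigenere
-- ===== SOURCE A (Python) =====
-- def egcd(a, b):
--     if a == 0:
--         return (b, 0, 1)
--     else:
--         g, y, x = egcd(b % a, a)
--         return (g, x - (b // a) * y, y)
--
-- def modinv(a, m):
--     g, x, y = egcd(a, m)
--     if g != 1:
--         raise Exception('modular inverse does not exist')
--     else:
--         return x % m
--
-- def affineVigenere(text,key1,key2,decode=False):
--     alphabet = "ABCDEFGHIJKLMNOPQRSTUVWXYZ0123456789#"
--     T = []
--     kLen1 = len(key1)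
--     kLen2 = len(key2)
--
--     if "#" in key2:
--         raise Exception('cannot use # symbol in multiplicative key')
--
--     # convert the keys to lists of numbers
--     K1, K2, = [],[]
--     for i in key1:
--         K1.append(alphabet.find(i))
--
--     for i in key2:
--         K2.append(alphabet.find(i))
--
--     for ind,let in enumerate(text):
--         N = alphabet.index(let)
--
--         if decode == False:
--             N = (N+K1[ind%kLen1])%37
--             N = (N*(K2[ind%kLen2]+1))%37
--         else:
--             inv = modinv(K2[ind%kLen2]+1,37)
--             N = (N*inv)%37
--             N = (N-K1[ind%kLen1])%37
--
--         T.append(N)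
--
--     for t in range(len(T)):
--         T[t] = alphabet[T[t]]
--
--     return "".join(T)
-- ===== SOURCE B (Python) =====
-- def affineVigenere(text, key1, key2, decode=False):
--     alphabet = "ABCDEFGHIJKLMNOPQRSTUVWXYZ0123456789#"
--     if "#" in key2:
--         raise Exception('cannot use # symbol in multiplicative key')
--     k1 = [alphabet.find(c) for c in key1]
--     k2 = [alphabet.find(c) for c in key2]
--     a, b = len(key1), len(key2)
--     while b:
--         a, b = b, a % b
--     period = len(key1) * len(key2) // a if a else 0
--     tables = []
--     for r in range(period):
--         add = k1[r % len(key1)]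
--         mul = k2[r % len(key2)] + 1
--         if decode:
--             inv = pow(mul, 35, 37)  # Fermat: inverse of mul modulo the prime 37
--             tables.append([alphabet[(n * inv - add) % 37] for n in range(37)])
--         else:
--             tables.append([alphabet[((n + add) * mul) % 37] for n in range(37)])
--     out = []
--     for ind, let in enumerate(text):
--         out.append(tables[ind % period][alphabet.index(let)])
--     return "".join(out)
-- ===== Notes on version B (the rewrite author's own statement) =====
-- stated objective: alternative
-- what changed: Instead of A's per-character affine arithmetic with an egcd-based modular inverse recomputed for every character when decoding, B precomputes one 37-entry substitution table per residue of the key period (lcm of the key lengths, inverses obtained once per residue via Fermat's little theorem pow(mul,35,37)) and then makes a single table-lookup pass over the text.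
import Mathlib
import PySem

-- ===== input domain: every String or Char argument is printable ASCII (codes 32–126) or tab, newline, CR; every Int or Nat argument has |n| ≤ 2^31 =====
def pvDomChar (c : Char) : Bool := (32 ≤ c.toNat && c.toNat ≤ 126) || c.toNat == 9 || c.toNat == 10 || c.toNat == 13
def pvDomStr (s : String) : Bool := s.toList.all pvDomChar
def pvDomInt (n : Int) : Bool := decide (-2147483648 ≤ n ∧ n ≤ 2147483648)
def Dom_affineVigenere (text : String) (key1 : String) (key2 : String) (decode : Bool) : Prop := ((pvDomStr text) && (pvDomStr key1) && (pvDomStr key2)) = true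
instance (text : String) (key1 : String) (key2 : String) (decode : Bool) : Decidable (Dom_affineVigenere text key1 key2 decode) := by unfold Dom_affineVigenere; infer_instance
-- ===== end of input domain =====

-- B replaces A's per-character affine arithmetic (with an egcd-based modular inverse recomputed
-- for every character when decoding) by substitution tables precomputed once per key-period
-- residue (inverse via Fermat's little theorem), leaving a single table-lookup pass over the text;
-- objective: alternative structure.

-- ===== PORT A =====
-- The 37-symbol alphabet (shared constant; also used by Pre_).
def pvAlpha : List Char :=
  ['A','B','C','D','E','F','G','H','I','J','K','L','M',
   'N','O','P','Q','R','S','T','U','V','W','X','Y','Z',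
   '0','1','2','3','4','5','6','7','8','9','#']

-- egcd(a, b): structural recursion on fuel; 64 is ample for every call the program makes
-- (inside Pre_ it is only called with a ∈ 1..36, m = 37); none = would-be nontermination.
def pyEgcd : Nat → Int → Int → Option (Int × Int × Int)
  | 0, _, _ => none
  | fuel+1, a, b =>
    if a = 0 then some (b, 0, 1)
    else
      match pyEgcd fuel (PySem.Int.mod b a) a with
      | none => none
      | some (g, y, x) => some (g, x - PySem.Int.floordiv b a * y, y)

-- modinv(a, m); none = the 'modular inverse does not exist' exception
def pyModinv (a m : Int) : Option Int :=
  match pyEgcd 64 a m with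
  | none => none
  | some (g, x, _y) => if g ≠ 1 then none else some (PySem.Int.mod x m)

-- the body of A's 'for ind,let in enumerate(text)' loop: the number appended to T
-- (none = a raise: text char not in the alphabet, % by zero, or no modular inverse)
def stepA (K1 K2 : List Int) (kLen1 kLen2 : Nat) (decode : Bool) (p : Int × Char) : Option Int :=
  match PySem.List.index? pvAlpha p.2 with      -- N = alphabet.index(let)
  | none => none                                -- ValueError
  | some N =>
    if decode = false then
      match PySem.Int.mod? p.1 (kLen1 : Int) with
      | none => none                            -- ZeroDivisionError
      | some i1 =>
        match PySem.List.pyGet? K1 i1 with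
        | none => none
        | some a1 =>
          let N1 := PySem.Int.mod ((N : Int) + a1) 37
          match PySem.Int.mod? p.1 (kLen2 : Int) with
          | none => none
          | some i2 =>
            match PySem.List.pyGet? K2 i2 with
            | none => none
            | some a2 => some (PySem.Int.mod (N1 * (a2 + 1)) 37)
    else
      match PySem.Int.mod? p.1 (kLen2 : Int) with
      | none => none
      | some i2 =>
        match PySem.List.pyGet? K2 i2 with
        | none => none
        | some a2 =>
          match pyModinv (a2 + 1) 37 with
          | none => none                        -- 'modular inverse does not exist'
          | some inv =>
            let N1 := PySem.Int.mod ((N : Int) * inv) 37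
            match PySem.Int.mod? p.1 (kLen1 : Int) with
            | none => none
            | some i1 =>
              match PySem.List.pyGet? K1 i1 with
              | none => none
              | some a1 => some (PySem.Int.mod (N1 - a1) 37)

def affineVigenere (text : String) (key1 : String) (key2 : String) (decode : Bool) : String :=
  let kLen1 := key1.toList.length
  let kLen2 := key2.toList.length
  if PySem.Str.isIn "#" key2 then ""            -- raise Exception: outside Pre_
  else
    let K1 := key1.toList.foldl (fun acc c => acc ++ [PySem.Chars.find pvAlpha [c]]) []
    let K2 := key2.toList.foldl (fun acc c => acc ++ [PySem.Chars.find pvAlpha [c]]) []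
    let T : Option (List Int) :=
      (PySem.List.enumerate text.toList 0).foldl
        (fun acc p => acc.bind fun Ts => (stepA K1 K2 kLen1 kLen2 decode p).map fun n => Ts ++ [n])
        (some [])
    match T with
    | none => ""                                -- a raise inside the loop: outside Pre_
    | some Ts =>
      -- 'for t in range(len(T)): T[t] = alphabet[T[t]]': elementwise in-place replacement
      match Ts.mapM (fun t => PySem.List.pyGet? pvAlpha t) with
      | none => ""                              -- IndexError: unreachable (values are mod 37)
      | some cs => String.mk cs                 -- "".join(T)

-- ===== PORT B =====
-- the 'while b: a, b = b, a % b' gcd loop of Source B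
def pyGcdLoop (a b : Nat) : Nat :=
  if h : b = 0 then a else pyGcdLoop b (a % b)
termination_by b
decreasing_by exact Nat.mod_lt _ (Nat.pos_of_ne_zero h)

-- the substitution table Source B builds for residue r (the two list comprehensions);
-- pyGetD: these indexings cannot fail where the table is built/consulted (r < period ⇒
-- both key indices are in range; the alphabet index is a value mod 37), defaults are never used
def tableB (k1 k2 : List Int) (l1 l2 : Nat) (decode : Bool) (r : Int) : List Char :=
  let add := PySem.List.pyGetD k1 (PySem.Int.mod r (l1 : Int)) 0
  let mul := PySem.List.pyGetD k2 (PySem.Int.mod r (l2 : Int)) 0 + 1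
  if decode then
    let inv := PySem.Int.powMod mul 35 37       -- pow(mul, 35, 37): Fermat inverse mod prime 37
    (PySem.List.pyRange 0 37 1).map (fun n => PySem.List.pyGetD pvAlpha (PySem.Int.mod (n * inv - add) 37) 'A')
  else
    (PySem.List.pyRange 0 37 1).map (fun n => PySem.List.pyGetD pvAlpha (PySem.Int.mod ((n + add) * mul) 37) 'A')

-- the body of Source B's 'for ind, let in enumerate(text)' loop: the output character
def stepB (tables : List (List Char)) (period : Nat) (p : Int × Char) : Option Char :=
  match PySem.List.index? pvAlpha p.2 with      -- alphabet.index(let); ValueError = none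
  | none => none
  | some N =>
    match PySem.Int.mod? p.1 (period : Int) with  -- ind % period; ZeroDivisionError = none
    | none => none
    | some r => some (PySem.List.pyGetD (PySem.List.pyGetD tables r []) (N : Int) 'A')

def affineVigenere_alt (text : String) (key1 : String) (key2 : String) (decode : Bool) : String :=
  if PySem.Str.isIn "#" key2 then ""            -- raise Exception: outside Pre_
  else
    let l1 := key1.toList.length
    let l2 := key2.toList.length
    let k1 := key1.toList.map (fun c => PySem.Chars.find pvAlpha [c])
    let k2 := key2.toList.map (fun c => PySem.Chars.find pvAlpha [c])
    let g := pyGcdLoop l1 l2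
    let period := if g = 0 then 0 else l1 * l2 / g
    let tables := (PySem.List.pyRange 0 (period : Int) 1).map (tableB k1 k2 l1 l2 decode)
    let out : Option (List Char) :=
      (PySem.List.enumerate text.toList 0).foldl
        (fun acc p => acc.bind fun cs => (stepB tables period p).map fun ch => cs ++ [ch])
        (some [])
    match out with
    | none => ""                                -- a raise inside the loop: outside Pre_
    | some cs => String.mk cs                   -- "".join(out)

-- ===== PRECONDITION & SPEC =====
-- Pre_ excludes exactly the inputs on which A raises: a text character outside the 37-symbol
-- alphabet (ValueError), '#' in key2 (Exception), an empty key with nonempty text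
-- (ZeroDivisionError), and decoding when a key2 character that the loop actually uses
-- (the first min(len(text), len(key2)) of them) is outside the alphabet (the modular-inverse
-- Exception).  On every input it admits, A returns normally.
def Pre_affineVigenere (text : String) (key1 : String) (key2 : String) (decode : Bool) : Prop :=
  (text.toList.all (fun c => pvAlpha.contains c) = true) ∧
  (key2.toList.contains '#' = false) ∧
  (text.toList ≠ [] → key1.toList ≠ [] ∧ key2.toList ≠ []) ∧
  (decode = true → (key2.toList.take text.toList.length).all (fun c => pvAlpha.contains c) = true)
instance (text : String) (key1 : String) (key2 : String) (decode : Bool) : Decidable (Pre_affineVigenere text key1 key2 decode) := by unfold Pre_affineVigenere; infer_instance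

def pvWitness_affineVigenere : String × String × String × Bool := ("AB", "B", "C", false)

def Spec_affineVigenere (text : String) (key1 : String) (key2 : String) (decode : Bool) (out : String) : Prop := out = affineVigenere_alt text key1 key2 decode
instance (text : String) (key1 : String) (key2 : String) (decode : Bool) (out : String) : Decidable (Spec_affineVigenere text key1 key2 decode out) := by unfold Spec_affineVigenere; infer_instance

-- ===== CLAIM (what is proved, stated in full; the proofs are below) =====
def Claim_equal_affineVigenere : Prop := ∀ (text : String) (key1 : String) (key2 : String) (decode : Bool), Dom_affineVigenere text key1 key2 decode → Pre_affineVigenere text key1 key2 decode → Spec_affineVigenere text key1 key2 decode (affineVigenere text key1 key2 decode)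

-- ===== LEMMAS AND PROOFS =====

-- a loop whose accumulator has become none stays none
lemma foldl_opt_none {β γ : Type} (f : β → Option γ) (l : List β) :
    l.foldl (fun a p => a.bind fun Ts => (f p).map fun n => Ts ++ [n]) none = none := by
  induction l with
  | nil => rfl
  | cons x xs ih => simpa using ih

-- the append-an-Option-value loop is mapM
lemma foldl_opt_append {β γ : Type} (f : β → Option γ) (l : List β) (acc : List γ) :
    l.foldl (fun a p => a.bind fun Ts => (f p).map fun n => Ts ++ [n]) (some acc)
      = (l.mapM f).map (fun vs => acc ++ vs) := by
  induction l generalizing acc with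
  | nil => simp
  | cons x xs ih =>
    simp only [List.foldl_cons, List.mapM_cons]
    cases hx : f x with
    | none => simp [hx, foldl_opt_none]
    | some v =>
      simp only [hx, Option.bind_some, Option.map_some, ih (acc ++ [v])]
      cases List.mapM f xs <;> simp

-- fusing A's two passes (numbers, then chars) against B's one pass, pointwise
lemma mapM_fuse {β γ δ : Type} (fA : β → Option γ) (g : γ → Option δ) (fB : β → Option δ)
    (l : List β) (h : ∀ p ∈ l, ∃ v w, fA p = some v ∧ g v = some w ∧ fB p = some w) :
    ∃ vs ws, l.mapM fA = some vs ∧ vs.mapM g = some ws ∧ l.mapM fB = some ws := by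
  induction l with
  | nil => exact ⟨[], [], rfl, rfl, rfl⟩
  | cons x xs ih =>
    obtain ⟨v, w, hv, hw, hb⟩ := h x (List.mem_cons_self ..)
    obtain ⟨vs, ws, hvs, hws, hbs⟩ := ih (fun p hp => h p (List.mem_cons_of_mem _ hp))
    exact ⟨v :: vs, w :: ws, by simp [hv, hvs], by simp [hw, hws], by simp [hb, hbs]⟩

-- facts about the fixed alphabet, checked by evaluation character by character
def alphaIdx (c : Char) : Nat := (PySem.List.index? pvAlpha c).getD 0

set_option maxHeartbeats 2000000 in
lemma alpha_facts' (c : Char) (hc : c ∈ pvAlpha) :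
    PySem.List.index? pvAlpha c = some (alphaIdx c) ∧
      PySem.Chars.find pvAlpha [c] = (alphaIdx c : Int) ∧ alphaIdx c < 37 ∧
      (c ≠ '#' → alphaIdx c < 36) := by
  fin_cases hc <;> refine ⟨by decide, by decide, by decide, fun hne => ?_⟩ <;>
    first
      | decide
      | exact absurd rfl hne

lemma alpha_facts (c : Char) (hc : c ∈ pvAlpha) :
    ∃ N : Nat, PySem.List.index? pvAlpha c = some N ∧
      PySem.Chars.find pvAlpha [c] = (N : Int) ∧ N < 37 ∧ (c ≠ '#' → N < 36) := by
  obtain ⟨ha, hb, hcc, hd⟩ := alpha_facts' c hc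
  exact ⟨alphaIdx c, ha, hb, hcc, hd⟩

-- A's egcd-based inverse agrees with B's Fermat inverse for every multiplier 1..36
lemma modinv_eq_powMod : ∀ n ∈ List.range 36,
    pyModinv ((n : Int) + 1) 37 = some (PySem.Int.powMod ((n : Int) + 1) 35 37) := by decide

lemma pyGcdLoop_eq (a b : Nat) : pyGcdLoop a b = Nat.gcd a b := by
  induction b using Nat.strong_induction_on generalizing a with
  | _ b ih =>
    rw [pyGcdLoop]
    split
    · rename_i h; subst h; simp
    · rename_i h
      rw [ih (a % b) (Nat.mod_lt _ (Nat.pos_of_ne_zero h)) b,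
        Nat.gcd_comm b (a % b), ← Nat.gcd_rec, Nat.gcd_comm]

lemma pvAlpha_length : pvAlpha.length = 37 := by decide


lemma mod37_mul (x y : Int) :
    PySem.Int.mod (PySem.Int.mod x 37 * y) 37 = PySem.Int.mod (x * y) 37 := by
  simp only [PySem.Int.mod_eq_emod_of_pos (show (0:Int) < 37 by norm_num)]
  conv_lhs => rw [Int.mul_emod]
  conv_rhs => rw [Int.mul_emod]
  simp [Int.emod_emod_of_dvd]

lemma mod37_sub (x y : Int) :
    PySem.Int.mod (PySem.Int.mod x 37 - y) 37 = PySem.Int.mod (x - y) 37 := by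
  simp only [PySem.Int.mod_eq_emod_of_pos (show (0:Int) < 37 by norm_num)]
  conv_lhs => rw [Int.sub_emod]
  conv_rhs => rw [Int.sub_emod]
  simp [Int.emod_emod_of_dvd]

lemma mod?_natCast (k m : Nat) (hm : m ≠ 0) :
    PySem.Int.mod? ((k : Nat) : Int) ((m : Nat) : Int) = some (((k % m : Nat) : Nat) : Int) := by
  have hmz : ((m : Nat) : Int) ≠ 0 := by exact_mod_cast hm
  have h1 : PySem.Int.mod? ((k : Nat) : Int) ((m : Nat) : Int)
      = some (PySem.Int.mod ((k : Nat) : Int) ((m : Nat) : Int)) := by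
    simp [PySem.Int.mod?, PySem.Int.mod, hm]
  rw [h1, PySem.Int.mod_natCast]

-- the value A's result list holds at index ind, and the bound making alphabet[·] defined
lemma mod37_bounds (x : Int) : 0 ≤ PySem.Int.mod x 37 ∧ PySem.Int.mod x 37 < 37 :=
  ⟨PySem.Int.mod_nonneg x (by norm_num), PySem.Int.mod_lt x (by norm_num)⟩

lemma mod37_toNat_lt (x : Int) : (PySem.Int.mod x 37).toNat < pvAlpha.length := by
  have h := mod37_bounds x
  rw [pvAlpha_length]
  omega

lemma alphaGet_mod37 (x : Int) :
    PySem.List.pyGet? pvAlpha (PySem.Int.mod x 37)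
      = some (pvAlpha[(PySem.Int.mod x 37).toNat]'(mod37_toNat_lt x)) := by
  rw [PySem.List.pyGet?_of_nonneg pvAlpha (mod37_bounds x).1]
  exact List.getElem?_eq_getElem _

lemma alphaGetD_mod37 (x : Int) (d : Char) :
    PySem.List.pyGetD pvAlpha (PySem.Int.mod x 37) d
      = pvAlpha[(PySem.Int.mod x 37).toNat]'(mod37_toNat_lt x) := by
  rw [PySem.List.pyGetD_of_nonneg _ _ (mod37_bounds x).1]
  exact List.getD_eq_getElem _ _ (mod37_toNat_lt x)

lemma main_eq (text key1 key2 : String) (decode : Bool)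
    (hpre : Pre_affineVigenere text key1 key2 decode) :
    affineVigenere text key1 key2 decode = affineVigenere_alt text key1 key2 decode := by
  obtain ⟨h1b, h2b, h3, h4b⟩ := hpre
  have h1 : ∀ c ∈ text.toList, c ∈ pvAlpha := by simpa using h1b
  have h2 : '#' ∉ key2.toList := by simpa using h2b
  have h4 : decode = true → ∀ c ∈ key2.toList.take text.toList.length, c ∈ pvAlpha :=
    fun hd => by simpa using h4b hd
  have hisin : PySem.Str.isIn "#" key2 = false := by
    rw [Bool.eq_false_iff]
    intro hT
    have hinf := (PySem.Str.isIn_iff_infix "#" key2).mp hT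
    have h' : ('#' : Char) ∈ key2.toList :=
      (List.singleton_infix_iff _ _).mp (by simpa using hinf)
    exact h2 h'
  unfold affineVigenere affineVigenere_alt
  simp only [hisin, Bool.false_eq_true, if_false]
  by_cases hte : text.toList = []
  · -- empty text: both programs return ""
    simp [hte, PySem.List.enumerate]
  · obtain ⟨hk1ne, hk2ne⟩ := h3 hte
    have hl1 : 0 < key1.toList.length := List.length_pos_iff.mpr hk1ne
    have hl2 : 0 < key2.toList.length := List.length_pos_iff.mpr hk2ne
    have hgcd : pyGcdLoop key1.toList.length key2.toList.length
        = Nat.gcd key1.toList.length key2.toList.length := pyGcdLoop_eq _ _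
    have hgne : Nat.gcd key1.toList.length key2.toList.length ≠ 0 :=
      (Nat.gcd_pos_of_pos_left _ hl1).ne'
    have hlcmdef : key1.toList.length * key2.toList.length
        / Nat.gcd key1.toList.length key2.toList.length
        = Nat.lcm key1.toList.length key2.toList.length := rfl
    have hlcm : 0 < Nat.lcm key1.toList.length key2.toList.length :=
      Nat.pos_of_ne_zero (Nat.lcm_ne_zero (by omega) (by omega))
    rw [hgcd, if_neg hgne, hlcmdef,
      PySem.List.foldl_append_singleton_eq_map, PySem.List.foldl_append_singleton_eq_map]
    simp only [List.nil_append]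
    rw [foldl_opt_append, foldl_opt_append]
    have hpoint : ∀ p ∈ PySem.List.enumerate text.toList 0,
        ∃ v w,
          stepA (key1.toList.map fun c => PySem.Chars.find pvAlpha [c])
            (key2.toList.map fun c => PySem.Chars.find pvAlpha [c])
            key1.toList.length key2.toList.length decode p = some v ∧
          PySem.List.pyGet? pvAlpha v = some w ∧
          stepB ((PySem.List.pyRange 0 ((Nat.lcm key1.toList.length key2.toList.length : Nat) : Int) 1).map
              (tableB (key1.toList.map fun c => PySem.Chars.find pvAlpha [c])
                (key2.toList.map fun c => PySem.Chars.find pvAlpha [c])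
                key1.toList.length key2.toList.length decode))
            (Nat.lcm key1.toList.length key2.toList.length) p = some w := by
      intro p hp
      rw [PySem.List.mem_enumerate_iff] at hp
      obtain ⟨k, hk, rfl⟩ := hp
      obtain ⟨N, hidx, hfind, hN37, _⟩ :=
        alpha_facts (text.toList[k]) (h1 _ (List.getElem_mem hk))
      -- shared abbreviations
      have hm1 : k % key1.toList.length < key1.toList.length := Nat.mod_lt _ hl1
      have hm2 : k % key2.toList.length < key2.toList.length := Nat.mod_lt _ hl2
      have hmL : k % Nat.lcm key1.toList.length key2.toList.length
          < Nat.lcm key1.toList.length key2.toList.length := Nat.mod_lt _ hlcm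
      have hget1 : PySem.List.pyGet?
            (key1.toList.map fun c => PySem.Chars.find pvAlpha [c])
            ((k % key1.toList.length : Nat) : Int)
          = some (PySem.Chars.find pvAlpha [key1.toList[k % key1.toList.length]'hm1]) := by
        rw [PySem.List.pyGet?_natCast, List.getElem?_map,
          List.getElem?_eq_getElem hm1]
        rfl
      have hget2 : PySem.List.pyGet?
            (key2.toList.map fun c => PySem.Chars.find pvAlpha [c])
            ((k % key2.toList.length : Nat) : Int)
          = some (PySem.Chars.find pvAlpha [key2.toList[k % key2.toList.length]'hm2]) := by
        rw [PySem.List.pyGet?_natCast, List.getElem?_map,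
          List.getElem?_eq_getElem hm2]
        rfl
      have hgetD1 : PySem.List.pyGetD
            (key1.toList.map fun c => PySem.Chars.find pvAlpha [c])
            ((k % key1.toList.length : Nat) : Int) 0
          = PySem.Chars.find pvAlpha [key1.toList[k % key1.toList.length]'hm1] := by
        rw [PySem.List.pyGetD_natCast,
          List.getD_eq_getElem _ _ (by simpa using hm1)]
        simp
      have hgetD2 : PySem.List.pyGetD
            (key2.toList.map fun c => PySem.Chars.find pvAlpha [c])
            ((k % key2.toList.length : Nat) : Int) 0
          = PySem.Chars.find pvAlpha [key2.toList[k % key2.toList.length]'hm2] := by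
        rw [PySem.List.pyGetD_natCast,
          List.getD_eq_getElem _ _ (by simpa using hm2)]
        simp
      -- the residue Source B consults reads the keys at the same positions as A
      have hr1 : (k % Nat.lcm key1.toList.length key2.toList.length) % key1.toList.length
          = k % key1.toList.length := Nat.mod_mod_of_dvd k (Nat.dvd_lcm_left _ _)
      have hr2 : (k % Nat.lcm key1.toList.length key2.toList.length) % key2.toList.length
          = k % key2.toList.length := Nat.mod_mod_of_dvd k (Nat.dvd_lcm_right _ _)
      have hmodr1 : PySem.Int.mod
            ((k % Nat.lcm key1.toList.length key2.toList.length : Nat) : Int)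
            ((key1.toList.length : Nat) : Int)
          = ((k % key1.toList.length : Nat) : Int) := by
        rw [PySem.Int.mod_natCast, hr1]
      have hmodr2 : PySem.Int.mod
            ((k % Nat.lcm key1.toList.length key2.toList.length : Nat) : Int)
            ((key2.toList.length : Nat) : Int)
          = ((k % key2.toList.length : Nat) : Int) := by
        rw [PySem.Int.mod_natCast, hr2]
      -- evaluate B's table lookup down to the table entry function
      have htab : PySem.List.pyGetD
            ((PySem.List.pyRange 0 ((Nat.lcm key1.toList.length key2.toList.length : Nat) : Int) 1).map
              (tableB (key1.toList.map fun c => PySem.Chars.find pvAlpha [c])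
                (key2.toList.map fun c => PySem.Chars.find pvAlpha [c])
                key1.toList.length key2.toList.length decode))
            ((k % Nat.lcm key1.toList.length key2.toList.length : Nat) : Int) []
          = tableB (key1.toList.map fun c => PySem.Chars.find pvAlpha [c])
              (key2.toList.map fun c => PySem.Chars.find pvAlpha [c])
              key1.toList.length key2.toList.length decode
              ((k % Nat.lcm key1.toList.length key2.toList.length : Nat) : Int) :=
        PySem.List.pyGetD_map_pyRange _ _ _ _ hmL
      cases decode with
      | false =>
        refine ⟨PySem.Int.mod
            (PySem.Int.mod ((N : Int) + PySem.Chars.find pvAlpha [key1.toList[k % key1.toList.length]'hm1]) 37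
              * (PySem.Chars.find pvAlpha [key2.toList[k % key2.toList.length]'hm2] + 1)) 37,
          pvAlpha[(PySem.Int.mod
            (((N : Int) + PySem.Chars.find pvAlpha [key1.toList[k % key1.toList.length]'hm1])
              * (PySem.Chars.find pvAlpha [key2.toList[k % key2.toList.length]'hm2] + 1)) 37).toNat]'(mod37_toNat_lt _),
          ?_, ?_, ?_⟩
        · simp only [stepA, zero_add, hidx,
            mod?_natCast k key1.toList.length hl1.ne',
            mod?_natCast k key2.toList.length hl2.ne', hget1, hget2,
            Bool.false_eq_true, if_true, if_false, eq_self_iff_true]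
        · rw [mod37_mul]
          exact alphaGet_mod37 _
        · simp only [stepB, zero_add, hidx,
            mod?_natCast k (Nat.lcm key1.toList.length key2.toList.length) hlcm.ne',
            htab, tableB, Bool.false_eq_true, if_false, hmodr1, hmodr2, hgetD1, hgetD2]
          rw [PySem.List.pyGetD_map_pyRange_of_nonneg _ 37 (N : Int) _
            (by positivity) (by exact_mod_cast hN37)]
          rw [alphaGetD_mod37]
      | true =>
        -- the key2 character the loop uses lies in take(len(text)) of key2, so Pre_ makes it
        -- an alphabet character distinct from '#'
        have hkt : k % key2.toList.length < text.toList.length :=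
          lt_of_le_of_lt (Nat.mod_le k _) hk
        have hc2take : key2.toList[k % key2.toList.length]'hm2
            ∈ key2.toList.take text.toList.length := by
          have hb : k % key2.toList.length < (key2.toList.take text.toList.length).length := by
            rw [List.length_take]
            exact lt_min hkt hm2
          have := List.getElem_take (xs := key2.toList) (j := text.toList.length)
            (i := k % key2.toList.length) (h := hb)
          rw [← this]
          exact List.getElem_mem hb
        have hc2alpha : key2.toList[k % key2.toList.length]'hm2 ∈ pvAlpha :=
          h4 rfl _ hc2take
        have hc2ne : key2.toList[k % key2.toList.length]'hm2 ≠ '#' := by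
          intro he
          exact h2 (he ▸ List.getElem_mem hm2)
        obtain ⟨N2, hidx2, hfind2, _, hN2lt⟩ := alpha_facts _ hc2alpha
        have hN2 : N2 < 36 := hN2lt hc2ne
        have hinv : pyModinv
            (PySem.Chars.find pvAlpha [key2.toList[k % key2.toList.length]'hm2] + 1) 37
            = some (PySem.Int.powMod
              (PySem.Chars.find pvAlpha [key2.toList[k % key2.toList.length]'hm2] + 1) 35 37) := by
          rw [hfind2]
          exact modinv_eq_powMod N2 (List.mem_range.mpr hN2)
        refine ⟨PySem.Int.mod
            (PySem.Int.mod ((N : Int) * PySem.Int.powMod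
              (PySem.Chars.find pvAlpha [key2.toList[k % key2.toList.length]'hm2] + 1) 35 37) 37
              - PySem.Chars.find pvAlpha [key1.toList[k % key1.toList.length]'hm1]) 37,
          pvAlpha[(PySem.Int.mod
            ((N : Int) * PySem.Int.powMod
              (PySem.Chars.find pvAlpha [key2.toList[k % key2.toList.length]'hm2] + 1) 35 37
              - PySem.Chars.find pvAlpha [key1.toList[k % key1.toList.length]'hm1]) 37).toNat]'(mod37_toNat_lt _),
          ?_, ?_, ?_⟩
        · simp only [stepA, zero_add, hidx,
            mod?_natCast k key1.toList.length hl1.ne',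
            mod?_natCast k key2.toList.length hl2.ne', hget1, hget2, hinv,
            Bool.true_eq_false, if_true, if_false, eq_self_iff_true]
        · rw [mod37_sub]
          exact alphaGet_mod37 _
        · simp only [stepB, zero_add, hidx,
            mod?_natCast k (Nat.lcm key1.toList.length key2.toList.length) hlcm.ne',
            htab, tableB, if_true, hmodr1, hmodr2, hgetD1, hgetD2]
          rw [PySem.List.pyGetD_map_pyRange_of_nonneg _ 37 (N : Int) _
            (by positivity) (by exact_mod_cast hN37)]
          rw [alphaGetD_mod37]
    obtain ⟨vs, ws, hvs, hws, hbs⟩ := mapM_fuse _ _ _ _ hpoint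
    rw [hvs, hbs]
    simp only [Option.map_some, List.nil_append]
    rw [show List.mapM (fun t => PySem.List.pyGet? pvAlpha t) vs = some ws from hws]


-- ===== VERDICT (by name: the statement is the Claim_ definition above) =====
theorem affineVigenere_spec : Claim_equal_affineVigenere := by
  intro text key1 key2 decode _hdom hpre
  exact main_eq text key1 key2 decode hpre
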